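-- pv_equiv track=rewrite | github.com/zhiqiangzhongddu/merging-graph | code/data_loader/summary.py | _normalize_dataset_names
-- ===== SOURCE A (Python) =====
-- from typing import Iterable, List, Optional, Sequence, Tuple
--
-- def _sorted_dataset_names(names: Sequence[str]) -> List[str]:
--     """Return deterministic A->Z ordering for dataset names."""
--     return sorted(names, key=lambda item: item.casefold())
--
-- def _normalize_dataset_names(names: Sequence[str]) -> List[str]:
--     unique_by_key = {}
--     for raw_name in names:
--         name = str(raw_name).strip()
--         if not name:
--             continue
--         key = name.casefold()
--         if key not in unique_by_key:
--             unique_by_key[key] = name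
--     return _sorted_dataset_names(list(unique_by_key.values()))
-- ===== SOURCE B (Python) =====
-- def _normalize_dataset_names(names):
--     cleaned = [name for name in (str(raw).strip() for raw in names) if name]
--     out = []
--     prev = None
--     for item in sorted(cleaned, key=str.casefold):
--         key = item.casefold()
--         if key != prev:
--             out.append(item)
--             prev = key
--     return out
-- ===== Notes on version B (the rewrite author's own statement) =====
-- stated objective: alternative
-- what changed: Replaces the first-seen casefold-keyed dict (dedupe before sorting) by a stable sort of the cleaned list followed by a single adjacent-key-dedup pass (dedupe after sorting); equal-key ties keep the first-seen casing because Python's sort is stable.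
import Mathlib
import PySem

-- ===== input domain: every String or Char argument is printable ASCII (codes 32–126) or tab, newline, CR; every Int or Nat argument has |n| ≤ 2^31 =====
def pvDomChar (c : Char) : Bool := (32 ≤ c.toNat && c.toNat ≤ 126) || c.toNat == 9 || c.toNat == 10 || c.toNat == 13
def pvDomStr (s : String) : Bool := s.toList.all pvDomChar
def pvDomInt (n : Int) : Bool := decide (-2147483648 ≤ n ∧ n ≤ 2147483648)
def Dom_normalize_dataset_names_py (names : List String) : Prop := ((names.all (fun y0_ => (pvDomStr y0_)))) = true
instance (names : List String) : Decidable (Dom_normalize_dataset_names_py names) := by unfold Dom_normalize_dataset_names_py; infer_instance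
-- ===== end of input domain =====

-- B replaces A's first-seen casefold-keyed dict (dedupe, then sort) by a stable sort of the
-- cleaned list followed by one adjacent-key dedup pass (sort, then dedupe): alternative algorithm.
-- str.casefold is ported as PySem.Str.lower, exact on the ASCII domain.

-- ===== PORT A =====
def pv_sorted_dataset_names (names : List String) : List String :=
  PySem.List.sorted names (fun item => PySem.Str.lower item)

def normalize_dataset_names_py (names : List String) : List String :=
  let unique_by_key := names.foldl (fun d raw_name =>
      let name := PySem.Str.strip raw_name
      if name = "" then d
      else
        let key := PySem.Str.lower name
        if d.contains key then d else d.insert key name)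
    (PySem.Dict.empty (κ := String) (ν := String))
  pv_sorted_dataset_names unique_by_key.values

-- ===== PORT B =====
-- the 'for item in sorted(...)' append loop of Source B, as recursion over the sorted list with the
-- 'prev' accumulator
def pv_adjDedup (prev : Option String) : List String → List String
  | [] => []
  | item :: rest =>
    if some (PySem.Str.lower item) = prev then pv_adjDedup prev rest
    else item :: pv_adjDedup (some (PySem.Str.lower item)) rest

def normalize_dataset_names_py_alt (names : List String) : List String :=
  let cleaned := (names.map (fun raw => PySem.Str.strip raw)).filter (fun name => !(name == ""))
  pv_adjDedup none (PySem.List.sorted cleaned (fun item => PySem.Str.lower item))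

-- ===== PRECONDITION & SPEC =====
def Spec_normalize_dataset_names_py (names : List String) (out : List String) : Prop := out = normalize_dataset_names_py_alt names
instance (names : List String) (out : List String) : Decidable (Spec_normalize_dataset_names_py names out) := by unfold Spec_normalize_dataset_names_py; infer_instance

-- ===== CLAIM (what is proved, stated in full; the proofs are below) =====
def Claim_equal_normalize_dataset_names_py : Prop := ∀ (names : List String), Dom_normalize_dataset_names_py names → Spec_normalize_dataset_names_py names (normalize_dataset_names_py names)

-- ===== LEMMAS AND PROOFS =====

-- first-seen dedup by casefold key over an already-cleaned list: the order in which A's dict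
-- collects its values
def pvDedupC (seen : List String) : List String → List String
  | [] => []
  | x :: xs =>
    if PySem.Str.lower x ∈ seen then pvDedupC seen xs
    else x :: pvDedupC (seen ++ [PySem.Str.lower x]) xs

-- one insertion step of PySem's insertion sort keeps the list sorted by the key
lemma pv_insertBy_pairwise (x : String) (ys : List String)
    (h : ys.Pairwise (fun a b => PySem.Str.lower a ≤ PySem.Str.lower b)) :
    (PySem.List.insertBy (fun a b => decide (PySem.Str.lower a < PySem.Str.lower b)) x ys).Pairwise
      (fun a b => PySem.Str.lower a ≤ PySem.Str.lower b) := by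
  induction ys with
  | nil => simp [PySem.List.insertBy]
  | cons y ys ih =>
    rw [List.pairwise_cons] at h
    obtain ⟨hy, hys⟩ := h
    by_cases hlt : PySem.Str.lower x < PySem.Str.lower y
    · simp only [PySem.List.insertBy, hlt, decide_true, if_true]
      refine List.Pairwise.cons ?_ (List.Pairwise.cons hy hys)
      intro z hz
      rcases List.mem_cons.mp hz with rfl | hz
      · exact le_of_lt hlt
      · exact le_trans (le_of_lt hlt) (hy z hz)
    · simp only [PySem.List.insertBy, hlt, decide_false, Bool.false_eq_true, if_false]
      refine List.Pairwise.cons ?_ (ih hys)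
      intro z hz
      rcases (PySem.List.mem_insertBy _ x z ys).mp hz with rfl | hz
      · exact le_of_not_gt hlt
      · exact hy z hz

-- stability at the level of one insertion: the first element with a given key
lemma pv_find?_insertBy (k : String) (x : String) (ys : List String)
    (h : ys.Pairwise (fun a b => PySem.Str.lower a ≤ PySem.Str.lower b)) :
    (PySem.List.insertBy (fun a b => decide (PySem.Str.lower a < PySem.Str.lower b)) x ys).find?
        (fun b => PySem.Str.lower b == k)
      = (ys.find? (fun b => PySem.Str.lower b == k)).or
          (if PySem.Str.lower x = k then some x else none) := by
  induction ys with
  | nil =>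
    simp only [PySem.List.insertBy, List.find?_nil, Option.or]
    by_cases hk : PySem.Str.lower x = k <;> simp [hk]
  | cons y ys ih =>
    rw [List.pairwise_cons] at h
    obtain ⟨hy, hys⟩ := h
    by_cases hlt : PySem.Str.lower x < PySem.Str.lower y
    · simp only [PySem.List.insertBy, hlt, decide_true, if_true]
      by_cases hk : PySem.Str.lower x = k
      · have hnone : (y :: ys).find? (fun b => PySem.Str.lower b == k) = none := by
          rw [List.find?_eq_none]
          intro z hz
          rcases List.mem_cons.mp hz with rfl | hz
          · simp only [beq_iff_eq]; intro hc; rw [hc] at hlt; exact absurd (hk ▸ hlt) (lt_irrefl k)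
          · simp only [beq_iff_eq]; intro hc
            have hle := hy z hz
            rw [hc] at hle
            exact absurd (lt_of_lt_of_le (hk ▸ hlt) hle) (lt_irrefl k)
        rw [hnone]
        simp [hk]
      · rw [List.find?_cons_of_neg (by simp [hk])]
        simp [hk]
    · simp only [PySem.List.insertBy, hlt, decide_false, Bool.false_eq_true, if_false]
      by_cases hk : PySem.Str.lower y = k
      · rw [List.find?_cons_of_pos (by simp [hk]), List.find?_cons_of_pos (by simp [hk])]
        simp [Option.or]
      · rw [List.find?_cons_of_neg (by simp [hk]), List.find?_cons_of_neg (by simp [hk])]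
        exact ih hys

lemma pv_find?_foldl_insertBy (k : String) (L : List String) (acc : List String)
    (h : acc.Pairwise (fun a b => PySem.Str.lower a ≤ PySem.Str.lower b)) :
    (L.foldl (fun acc x => PySem.List.insertBy (fun a b => decide (PySem.Str.lower a < PySem.Str.lower b)) x acc) acc).find?
        (fun b => PySem.Str.lower b == k)
      = (acc.find? (fun b => PySem.Str.lower b == k)).or (L.find? (fun b => PySem.Str.lower b == k)) := by
  induction L generalizing acc with
  | nil =>
    simp only [List.foldl_nil, List.find?_nil]
    cases acc.find? (fun b => PySem.Str.lower b == k) <;> rfl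
  | cons x xs ih =>
    simp only [List.foldl_cons]
    rw [ih _ (pv_insertBy_pairwise x acc h), pv_find?_insertBy k x acc h]
    by_cases hk : PySem.Str.lower x = k
    · rw [List.find?_cons_of_pos (by simp [hk])]
      cases acc.find? (fun b => PySem.Str.lower b == k) <;> simp [Option.or, hk]
    · rw [List.find?_cons_of_neg (by simp [hk])]
      simp [hk]

-- STABILITY of Python's sort: the first element with a given key is unchanged by sorting
lemma pv_find?_sorted (k : String) (L : List String) :
    (PySem.List.sorted L (fun item => PySem.Str.lower item)).find? (fun b => PySem.Str.lower b == k)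
      = L.find? (fun b => PySem.Str.lower b == k) := by
  rw [PySem.List.sorted_eq_foldl_insertBy, pv_find?_foldl_insertBy k L [] (by simp)]
  simp [Option.or]

-- membership in the first-seen dedup: exactly the first occurrence of each key
lemma pv_mem_dedupC (M : List String) (seen : List String) (a : String) :
    a ∈ pvDedupC seen M ↔
      PySem.Str.lower a ∉ seen ∧ M.find? (fun b => PySem.Str.lower b == PySem.Str.lower a) = some a := by
  induction M generalizing seen with
  | nil => simp [pvDedupC]
  | cons x xs ih =>
    by_cases hx : PySem.Str.lower x ∈ seen
    · rw [pvDedupC, if_pos hx]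
      by_cases hk : PySem.Str.lower x = PySem.Str.lower a
      · constructor
        · intro hmem
          exact absurd (hk ▸ hx) ((ih seen).mp hmem).1
        · rintro ⟨hns, _⟩; exact absurd (hk ▸ hx) hns
      · rw [ih seen, List.find?_cons_of_neg (by simp [hk])]
    · rw [pvDedupC, if_neg hx]
      by_cases hk : PySem.Str.lower x = PySem.Str.lower a
      · constructor
        · intro hmem
          rcases List.mem_cons.mp hmem with rfl | hmem
          · exact ⟨hx, by rw [List.find?_cons_of_pos (by simp)]⟩
          · have := (ih _).mp hmem
            simp [hk] at this
        · rintro ⟨hns, hf⟩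
          rw [List.find?_cons_of_pos (by simp [hk])] at hf
          exact List.mem_cons.mpr (Or.inl (Option.some_injective _ hf).symm)
      · rw [List.find?_cons_of_neg (by simp [hk])]
        constructor
        · intro hmem
          rcases List.mem_cons.mp hmem with rfl | hmem
          · exact absurd rfl hk
          · have h2 := (ih _).mp hmem
            refine ⟨fun hc => h2.1 (List.mem_append_left _ hc), h2.2⟩
        · rintro ⟨hns, hf⟩
          refine List.mem_cons.mpr (Or.inr ((ih _).mpr ⟨?_, hf⟩))
          simp only [List.mem_append, List.mem_singleton, not_or]
          exact ⟨hns, fun h => hk (Eq.symm h)⟩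

lemma pv_nodup_map_dedupC (M : List String) (seen : List String) :
    ((pvDedupC seen M).map PySem.Str.lower).Nodup := by
  induction M generalizing seen with
  | nil => simp [pvDedupC]
  | cons x xs ih =>
    by_cases hx : PySem.Str.lower x ∈ seen
    · rw [pvDedupC, if_pos hx]; exact ih seen
    · rw [pvDedupC, if_neg hx]
      simp only [List.map_cons, List.nodup_cons]
      refine ⟨?_, ih _⟩
      intro hc
      rcases List.mem_map.mp hc with ⟨b, hb, hbk⟩
      have := (pv_mem_dedupC xs _ b).mp hb
      exact this.1 (List.mem_append_right _ (by simp [hbk]))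

-- membership in the adjacent dedup of a key-sorted list: again the first occurrence of each key
lemma pv_mem_adjDedup (S : List String) (prev : Option String) (a : String)
    (hs : S.Pairwise (fun a b => PySem.Str.lower a ≤ PySem.Str.lower b))
    (hp : ∀ p, prev = some p → ∀ y ∈ S, p ≤ PySem.Str.lower y) :
    a ∈ pv_adjDedup prev S ↔
      some (PySem.Str.lower a) ≠ prev ∧
        S.find? (fun b => PySem.Str.lower b == PySem.Str.lower a) = some a := by
  induction S generalizing prev with
  | nil => simp [pv_adjDedup]
  | cons x xs ih =>
    rw [List.pairwise_cons] at hs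
    obtain ⟨hx, hxs⟩ := hs
    by_cases hpr : some (PySem.Str.lower x) = prev
    · rw [pv_adjDedup, if_pos hpr]
      have hinv : ∀ p, prev = some p → ∀ y ∈ xs, p ≤ PySem.Str.lower y := by
        intro p hep y hy
        rw [← hpr] at hep
        exact (Option.some_injective _ hep) ▸ hx y hy
      rw [ih prev hxs hinv]
      by_cases hk : PySem.Str.lower x = PySem.Str.lower a
      · constructor
        · rintro ⟨hne, _⟩; exact (hne (by rw [← hk, hpr])).elim
        · rintro ⟨hne, _⟩; exact (hne (by rw [← hk, hpr])).elim
      · rw [List.find?_cons_of_neg (by simp [hk])]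
    · rw [pv_adjDedup, if_neg hpr]
      by_cases hk : PySem.Str.lower x = PySem.Str.lower a
      · constructor
        · intro hmem
          rcases List.mem_cons.mp hmem with rfl | hmem
          · exact ⟨hpr, by rw [List.find?_cons_of_pos (by simp)]⟩
          · have := (ih (some (PySem.Str.lower x)) hxs (by
              rintro p hep y hy
              exact (Option.some_injective _ hep) ▸ hx y hy)).mp hmem
            exact (this.1 (by rw [hk])).elim
        · rintro ⟨hne, hf⟩
          rw [List.find?_cons_of_pos (by simp [hk])] at hf
          exact List.mem_cons.mpr (Or.inl (Option.some_injective _ hf).symm)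
      · rw [List.find?_cons_of_neg (by simp [hk])]
        have hih := ih (some (PySem.Str.lower x)) hxs (by
          rintro p hep y hy
          exact (Option.some_injective _ hep) ▸ hx y hy)
        constructor
        · intro hmem
          rcases List.mem_cons.mp hmem with rfl | hmem
          · exact absurd rfl hk
          · obtain ⟨hne, hf⟩ := hih.mp hmem
            refine ⟨?_, hf⟩
            have hamem : a ∈ xs := List.mem_of_find?_eq_some hf
            intro hc
            rcases prev with _ | p
            · exact Option.some_ne_none _ hc
            · have hpx : p ≤ PySem.Str.lower x := hp p rfl x (List.mem_cons_self)
              have hpa : p = PySem.Str.lower a := (Option.some_injective _ hc).symm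
              have hxa : PySem.Str.lower x ≤ PySem.Str.lower a := hx a hamem
              have hplt : p < PySem.Str.lower x := lt_of_le_of_ne hpx (by
                intro he; exact hpr (by rw [he]))
              exact absurd (hpa ▸ lt_of_lt_of_le hplt hxa) (lt_irrefl _)
        · rintro ⟨hne, hf⟩
          refine List.mem_cons.mpr (Or.inr (hih.mpr ⟨?_, hf⟩))
          intro hc
          exact hk (Option.some_injective _ hc).symm

lemma pv_pairwise_adjDedup (S : List String) (prev : Option String)
    (hs : S.Pairwise (fun a b => PySem.Str.lower a ≤ PySem.Str.lower b))
    (hp : ∀ p, prev = some p → ∀ y ∈ S, p ≤ PySem.Str.lower y) :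
    (pv_adjDedup prev S).Pairwise (fun a b => PySem.Str.lower a < PySem.Str.lower b) := by
  induction S generalizing prev with
  | nil => simp [pv_adjDedup]
  | cons x xs ih =>
    rw [List.pairwise_cons] at hs
    obtain ⟨hx, hxs⟩ := hs
    by_cases hpr : some (PySem.Str.lower x) = prev
    · rw [pv_adjDedup, if_pos hpr]
      exact ih prev hxs (by
        intro p hep y hy
        rw [← hpr] at hep
        exact (Option.some_injective _ hep) ▸ hx y hy)
    · rw [pv_adjDedup, if_neg hpr]
      have hinv : ∀ p, some (PySem.Str.lower x) = some p → ∀ y ∈ xs, p ≤ PySem.Str.lower y := by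
        rintro p hep y hy
        exact (Option.some_injective _ hep) ▸ hx y hy
      refine List.Pairwise.cons ?_ (ih _ hxs hinv)
      intro b hb
      obtain ⟨hne, hf⟩ := (pv_mem_adjDedup xs _ b hxs hinv).mp hb
      have hbmem : b ∈ xs := List.mem_of_find?_eq_some hf
      exact lt_of_le_of_ne (hx b hbmem) (fun he => hne (by rw [← he]))

-- A's dict loop collects exactly the first-seen-per-key cleaned names, in encounter order
lemma pv_values_foldl (L : List String) (d : PySem.Dict String String) :
    (L.foldl (fun d raw_name =>
        let name := PySem.Str.strip raw_name
        if name = "" then d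
        else
          let key := PySem.Str.lower name
          if d.contains key then d else d.insert key name) d).values
      = d.values ++ pvDedupC d.keys ((L.map (fun raw => PySem.Str.strip raw)).filter (fun name => !(name == ""))) := by
  induction L generalizing d with
  | nil => simp [pvDedupC]
  | cons x xs ih =>
    simp only [List.foldl_cons, List.map_cons, List.filter_cons]
    by_cases hname : PySem.Str.strip x = ""
    · simp only [hname]
      simpa [hname] using ih d
    · simp only [if_neg hname]
      have hbe : (!(PySem.Str.strip x == "")) = true := by simp [hname]
      rw [hbe, if_pos rfl]
      by_cases hc : d.contains (PySem.Str.lower (PySem.Str.strip x)) = true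
      · simp only [hc, if_true]
        rw [ih d, pvDedupC, if_pos ((PySem.Dict.contains_iff_mem_keys d _).mp hc)]
      · simp only [Bool.not_eq_true] at hc
        simp only [hc, Bool.false_eq_true, if_false]
        rw [ih _, PySem.Dict.keys_insert_of_not_contains d _ hc]
        have hv : (d.insert (PySem.Str.lower (PySem.Str.strip x)) (PySem.Str.strip x)).values
            = d.values ++ [PySem.Str.strip x] := by
          show ((d.insert _ _).items.map (·.2)) = _
          rw [PySem.Dict.items_insert_of_not_contains d _ hc]
          simp [PySem.Dict.values]
        rw [hv, pvDedupC, if_neg (fun hmem => by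
          rw [(PySem.Dict.contains_iff_mem_keys d _).mpr hmem] at hc; exact Bool.noConfusion hc)]
        simp

-- the core equality: sort-after-first-seen-dedup = adjacent-dedup-after-stable-sort
lemma pv_core (M : List String) :
    PySem.List.sorted (pvDedupC [] M) (fun item => PySem.Str.lower item)
      = pv_adjDedup none (PySem.List.sorted M (fun item => PySem.Str.lower item)) := by
  have hS := PySem.List.sorted_pairwise M (fun item => PySem.Str.lower item)
  have hinv : ∀ p, (none : Option String) = some p →
      ∀ y ∈ PySem.List.sorted M (fun item => PySem.Str.lower item), p ≤ PySem.Str.lower y := by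
    intro p hp; exact absurd hp (by simp)
  have hpw := pv_pairwise_adjDedup _ none hS hinv
  have hnodupR : (pv_adjDedup none (PySem.List.sorted M (fun item => PySem.Str.lower item))).Nodup := by
    refine List.Nodup.of_map PySem.Str.lower ?_
    rw [List.Nodup, List.pairwise_map]
    exact hpw.imp (fun h => ne_of_lt h)
  have hnodupD : (pvDedupC [] M).Nodup := List.Nodup.of_map _ (pv_nodup_map_dedupC M [])
  have hperm : (pv_adjDedup none (PySem.List.sorted M (fun item => PySem.Str.lower item))).Perm (pvDedupC [] M) := by
    rw [List.perm_ext_iff_of_nodup hnodupR hnodupD]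
    intro a
    rw [pv_mem_adjDedup _ none a hS hinv, pv_mem_dedupC M [] a, pv_find?_sorted]
    simp
  exact PySem.List.sorted_eq_of_perm_of_pairwise_lt _ _ _ hperm hpw

-- ===== VERDICT (by name: the statement is the Claim_ definition above) =====
theorem normalize_dataset_names_py_spec : Claim_equal_normalize_dataset_names_py := by
  intro names _
  unfold Spec_normalize_dataset_names_py normalize_dataset_names_py normalize_dataset_names_py_alt
    pv_sorted_dataset_names
  dsimp only
  rw [pv_values_foldl names PySem.Dict.empty]
  simp only [PySem.Dict.values, PySem.Dict.keys, PySem.Dict.empty, List.map_nil, List.nil_append]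
  exact pv_core _
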